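-- pv_equiv track=rewrite | github.com/minarth/advent-of-code | 2024/12/main.py | _count_xs
-- ===== SOURCE A (Python) =====
-- def _count_xs(x:int, y:int, xs: set):
--     # (x,y) point, find the fixed x, and moving along y
--     queue = [(x,y)]
--     found = set()
--     while queue:
--         a,b = queue.pop()
--         if (a,b) not in xs: continue
--         found.add((a,b))
--         if (a,b+1) not in found and (a,b+1) not in queue:
--             queue.append((a, b+1))
--         if (a,b-1) not in found and (a,b-1) not in queue:
--             queue.append((a, b-1))
--     return found, xs - found
-- ===== SOURCE B (Python) =====
-- def _count_xs(x: int, y: int, xs: set):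
--     # Two direct pointer scans (down, then up) along the fixed column x,
--     # instead of a DFS work-queue with linear membership tests on the queue.
--     found = set()
--     if (x, y) in xs:
--         found.add((x, y))
--         b = y - 1
--         while (x, b) in xs:
--             found.add((x, b))
--             b -= 1
--         b = y + 1
--         while (x, b) in xs:
--             found.add((x, b))
--             b += 1
--     return found, xs - found
-- ===== Notes on version B (the rewrite author's own statement) =====
-- stated objective: simpler
-- what changed: Replaces A's DFS work-queue (with pop, queue-membership tests and a visited set driving the search) by two direct pointer scans along the fixed column: walk down from y-1 and up from y+1 while the cell is in xs.
import Mathlib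
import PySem

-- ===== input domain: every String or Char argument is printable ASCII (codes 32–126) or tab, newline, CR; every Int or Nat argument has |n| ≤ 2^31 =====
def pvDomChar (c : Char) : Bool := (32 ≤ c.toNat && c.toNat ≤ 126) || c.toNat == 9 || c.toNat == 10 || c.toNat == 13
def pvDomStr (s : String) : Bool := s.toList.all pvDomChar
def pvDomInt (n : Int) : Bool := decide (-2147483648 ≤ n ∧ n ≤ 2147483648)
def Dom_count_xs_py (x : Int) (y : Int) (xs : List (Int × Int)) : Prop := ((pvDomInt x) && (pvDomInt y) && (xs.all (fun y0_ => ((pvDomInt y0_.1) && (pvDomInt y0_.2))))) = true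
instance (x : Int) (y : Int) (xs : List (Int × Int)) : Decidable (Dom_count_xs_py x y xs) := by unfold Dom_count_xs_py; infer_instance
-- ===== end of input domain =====

-- B replaces A's work-queue flood fill along the column by two direct pointer scans
-- (down from y, then up from y); objective: simpler (no queue, no queue-membership scans).

-- ===== PORT A =====
-- 'if v not in found and v not in queue: queue.append(v)'
def pvPush (found : List (Int × Int)) (queue : List (Int × Int)) (v : Int × Int) : List (Int × Int) :=
  if v ∉ found ∧ v ∉ queue then queue ++ [v] else queue

-- fuel recursion for A's while-loop; xs.length + 3 pops always suffice (proved below),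
-- the fuel-0 branch is a totality guard only.
def pvAuxA (xs : List (Int × Int)) : Nat → List (Int × Int) → List (Int × Int) → (List (Int × Int)) × (List (Int × Int))
  | 0, _, found => (found, PySem.Set.diff xs found)
  | f + 1, queue, found =>
    match PySem.List.pop? queue with
    | none => (found, PySem.Set.diff xs found)               -- while queue: loop exits, return found, xs - found
    | some ((a, b), rest) =>
      if (a, b) ∈ xs then
        let found2 := PySem.Set.add found (a, b)
        pvAuxA xs f (pvPush found2 (pvPush found2 rest (a, b + 1)) (a, b - 1)) found2
      else
        pvAuxA xs f rest found                               -- (a,b) not in xs: continue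

def count_xs_py (x : Int) (y : Int) (xs : List (Int × Int)) : (List (Int × Int)) × (List (Int × Int)) :=
  pvAuxA xs (xs.length + 3) [(x, y)] PySem.Set.empty

-- ===== PORT B =====
-- countP helpers used by B's termination measures (the while-loops stop because each
-- step consumes a distinct member of xs at or beyond the scan pointer).
theorem pvCountP_le {α : Type} (p q : α → Bool) (xs : List α)
    (hpq : ∀ a, p a = true → q a = true) : xs.countP p ≤ xs.countP q := by
  induction xs with
  | nil => simp
  | cons h t ih =>
    simp only [List.countP_cons]
    have hh : (if p h = true then 1 else 0) ≤ (if q h = true then 1 else 0) := by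
      by_cases hp : p h = true
      · rw [if_pos hp, if_pos (hpq h hp)]
      · rw [if_neg hp]; split_ifs <;> omega
    omega

theorem pvCountP_lt {α : Type} (p q : α → Bool) (xs : List α)
    (hpq : ∀ a, p a = true → q a = true) (a : α) (ha : a ∈ xs)
    (hpa : p a = false) (hqa : q a = true) : xs.countP p < xs.countP q := by
  induction xs with
  | nil => cases ha
  | cons h t ih =>
    simp only [List.countP_cons]
    rcases List.mem_cons.mp ha with rfl | hmem
    · have hle := pvCountP_le p q t hpq
      simp [hpa, hqa]
      omega
    · have h1 := ih hmem
      have hh : (if p h = true then 1 else 0) ≤ (if q h = true then 1 else 0) := by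
        by_cases hp : p h = true
        · rw [if_pos hp, if_pos (hpq h hp)]
        · rw [if_neg hp]; split_ifs <;> omega
      omega

def pvScanDown (xs : List (Int × Int)) (x : Int) (b : Int) (found : List (Int × Int)) : List (Int × Int) :=
  if h : (x, b) ∈ xs then
    pvScanDown xs x (b - 1) (PySem.Set.add found (x, b))
  else
    found
termination_by xs.countP (fun p => p.1 == x && decide (p.2 ≤ b))
decreasing_by
  exact pvCountP_lt _ _ xs
    (by intro a hpa; simp only [Bool.and_eq_true, beq_iff_eq, decide_eq_true_eq] at hpa ⊢
        exact ⟨hpa.1, by omega⟩)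
    (x, b) h
    (by simp only [Bool.and_eq_false_iff, decide_eq_false_iff_not]
        right; omega)
    (by simp)

def pvScanUp (xs : List (Int × Int)) (x : Int) (b : Int) (found : List (Int × Int)) : List (Int × Int) :=
  if h : (x, b) ∈ xs then
    pvScanUp xs x (b + 1) (PySem.Set.add found (x, b))
  else
    found
termination_by xs.countP (fun p => p.1 == x && decide (b ≤ p.2))
decreasing_by
  exact pvCountP_lt _ _ xs
    (by intro a hpa; simp only [Bool.and_eq_true, beq_iff_eq, decide_eq_true_eq] at hpa ⊢
        exact ⟨hpa.1, by omega⟩)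
    (x, b) h
    (by simp only [Bool.and_eq_false_iff, decide_eq_false_iff_not]
        right; omega)
    (by simp)

def count_xs_py_alt (x : Int) (y : Int) (xs : List (Int × Int)) : (List (Int × Int)) × (List (Int × Int)) :=
  let found :=
    if (x, y) ∈ xs then
      pvScanUp xs x (y + 1) (pvScanDown xs x (y - 1) (PySem.Set.add PySem.Set.empty (x, y)))
    else
      PySem.Set.empty
  (found, PySem.Set.diff xs found)

-- ===== PRECONDITION & SPEC =====
def Spec_count_xs_py (x : Int) (y : Int) (xs : List (Int × Int)) (out : (List (Int × Int)) × (List (Int × Int))) : Prop := out = count_xs_py_alt x y xs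
instance (x : Int) (y : Int) (xs : List (Int × Int)) (out : (List (Int × Int)) × (List (Int × Int))) : Decidable (Spec_count_xs_py x y xs out) := by unfold Spec_count_xs_py; infer_instance

-- ===== CLAIM (what is proved, stated in full; the proofs are below) =====
def Claim_equal_count_xs_py : Prop := ∀ (x : Int) (y : Int) (xs : List (Int × Int)), Dom_count_xs_py x y xs → Spec_count_xs_py x y xs (count_xs_py x y xs)

-- ===== LEMMAS AND PROOFS =====

theorem pvAuxA_nil (xs : List (Int × Int)) (f : Nat) (found : List (Int × Int)) :
    pvAuxA xs f [] found = (found, PySem.Set.diff xs found) := by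
  cases f <;> simp [pvAuxA, PySem.List.pop?, PySem.List.pyIdx?]

theorem pvCountP_disj {α : Type} (p q : α → Bool) (xs : List α)
    (h : ∀ a, p a = true → q a = false) : xs.countP p + xs.countP q ≤ xs.length := by
  induction xs with
  | nil => simp
  | cons a t ih =>
    simp only [List.countP_cons, List.length_cons]
    have hh : (if p a = true then 1 else 0) + (if q a = true then 1 else 0) ≤ 1 := by
      by_cases hp : p a = true
      · rw [if_pos hp, h a hp]; simp
      · rw [if_neg hp]; split_ifs <;> omega
    omega

theorem pvAdd_of_not_mem (found : List (Int × Int)) (v : Int × Int) (h : v ∉ found) :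
    PySem.Set.add found v = found ++ [v] := by
  simp [PySem.Set.add, PySem.Set.contains, h]

theorem pvPush_pos (found queue : List (Int × Int)) (v : Int × Int)
    (h1 : v ∉ found) (h2 : v ∉ queue) : pvPush found queue v = queue ++ [v] := by
  rw [pvPush, if_pos ⟨h1, h2⟩]

theorem pvPush_neg (found queue : List (Int × Int)) (v : Int × Int)
    (h : v ∈ found ∨ v ∈ queue) : pvPush found queue v = queue := by
  rw [pvPush, if_neg]
  rcases h with h | h
  · exact fun hc => hc.1 h
  · exact fun hc => hc.2 h

-- up phase: A's queue is the single cell (x, m); found holds exactly column x rows lo..m-1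
theorem pvUp (xs : List (Int × Int)) (x : Int) :
    ∀ (f : Nat) (m lo : Int) (found : List (Int × Int)),
      lo ≤ m - 1 →
      (∀ a b, (a, b) ∈ found ↔ a = x ∧ lo ≤ b ∧ b ≤ m - 1) →
      xs.countP (fun p => p.1 == x && decide (m ≤ p.2)) + 1 ≤ f →
      pvAuxA xs f [(x, m)] found =
        (pvScanUp xs x m found, PySem.Set.diff xs (pvScanUp xs x m found)) := by
  intro f
  induction f with
  | zero => intro m lo found _ _ hf; omega
  | succ f ih =>
    intro m lo found hlo hinv hf
    have hpop : PySem.List.pop? [(x, m)] = some ((x, m), []) := PySem.List.pop?_last [] (x, m)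
    by_cases hm : (x, m) ∈ xs
    · have hnot : (x, m) ∉ found := fun h => by have := (hinv x m).mp h; omega
      have hc1 : (x, m + 1) ∉ found ++ [(x, m)] := by
        intro hc
        rcases List.mem_append.mp hc with h | h
        · have := (hinv x (m + 1)).mp h; omega
        · simp only [List.mem_singleton, Prod.mk.injEq] at h; omega
      have hc2 : (x, m - 1) ∈ found ++ [(x, m)] :=
        List.mem_append_left _ ((hinv x (m - 1)).mpr ⟨rfl, hlo, le_refl _⟩)
      have hinv' : ∀ a b, (a, b) ∈ found ++ [(x, m)] ↔ a = x ∧ lo ≤ b ∧ b ≤ m + 1 - 1 := by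
        intro a b
        rw [List.mem_append, hinv a b]
        simp only [List.mem_singleton, Prod.mk.injEq]
        constructor
        · rintro (⟨rfl, h1, h2⟩ | ⟨rfl, rfl⟩) <;> exact ⟨rfl, by omega, by omega⟩
        · rintro ⟨rfl, h1, h2⟩
          by_cases hb : b = m
          · exact Or.inr ⟨rfl, hb⟩
          · exact Or.inl ⟨rfl, h1, by omega⟩
      have hfuel : xs.countP (fun p => p.1 == x && decide (m + 1 ≤ p.2)) + 1 ≤ f := by
        have hlt := pvCountP_lt (fun p => p.1 == x && decide (m + 1 ≤ p.2))
          (fun p => p.1 == x && decide (m ≤ p.2)) xs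
          (by intro a hpa; simp only [Bool.and_eq_true, beq_iff_eq, decide_eq_true_eq] at hpa ⊢
              exact ⟨hpa.1, by omega⟩)
          (x, m) hm
          (by simp only [Bool.and_eq_false_iff, decide_eq_false_iff_not]; right; omega)
          (by simp)
        omega
      simp only [pvAuxA, hpop]
      rw [if_pos hm, pvAdd_of_not_mem found (x, m) hnot]
      rw [pvPush_pos _ _ _ hc1 (by simp), List.nil_append]
      rw [pvPush_neg _ _ _ (Or.inl hc2)]
      rw [ih (m + 1) lo (found ++ [(x, m)]) (by omega) hinv' hfuel]
      have hstep : pvScanUp xs x m found = pvScanUp xs x (m + 1) (found ++ [(x, m)]) := by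
        rw [pvScanUp, dif_pos hm, pvAdd_of_not_mem found (x, m) hnot]
      rw [hstep]
    · simp only [pvAuxA, hpop]
      rw [if_neg hm, pvAuxA_nil, pvScanUp, dif_neg hm]

-- down phase: A's queue is [(x, y+1), (x, k)]; found holds exactly column x rows k+1..y
theorem pvDown (xs : List (Int × Int)) (x y : Int) :
    ∀ (f : Nat) (k : Int) (found : List (Int × Int)),
      k ≤ y - 1 →
      (∀ a b, (a, b) ∈ found ↔ a = x ∧ k + 1 ≤ b ∧ b ≤ y) →
      xs.countP (fun p => p.1 == x && decide (p.2 ≤ k)) +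
        xs.countP (fun p => p.1 == x && decide (y + 1 ≤ p.2)) + 2 ≤ f →
      pvAuxA xs f [(x, y + 1), (x, k)] found =
        (pvScanUp xs x (y + 1) (pvScanDown xs x k found),
         PySem.Set.diff xs (pvScanUp xs x (y + 1) (pvScanDown xs x k found))) := by
  intro f
  induction f with
  | zero => intro k found _ _ hf; omega
  | succ f ih =>
    intro k found hk hinv hf
    have hpop : PySem.List.pop? [(x, y + 1), (x, k)] = some ((x, k), [(x, y + 1)]) :=
      PySem.List.pop?_last [(x, y + 1)] (x, k)
    by_cases hm : (x, k) ∈ xs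
    · have hnot : (x, k) ∉ found := fun h => by have := (hinv x k).mp h; omega
      have hc1 : (x, k + 1) ∈ found ++ [(x, k)] :=
        List.mem_append_left _ ((hinv x (k + 1)).mpr ⟨rfl, le_refl _, by omega⟩)
      have hc2a : (x, k - 1) ∉ found ++ [(x, k)] := by
        intro hc
        rcases List.mem_append.mp hc with h | h
        · have := (hinv x (k - 1)).mp h; omega
        · simp only [List.mem_singleton, Prod.mk.injEq] at h; omega
      have hc2b : (x, k - 1) ∉ ([(x, y + 1)] : List (Int × Int)) := by
        simp only [List.mem_singleton, Prod.mk.injEq, not_and]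
        intro _; omega
      have hinv' : ∀ a b, (a, b) ∈ found ++ [(x, k)] ↔ a = x ∧ k - 1 + 1 ≤ b ∧ b ≤ y := by
        intro a b
        rw [List.mem_append, hinv a b]
        simp only [List.mem_singleton, Prod.mk.injEq]
        constructor
        · rintro (⟨rfl, h1, h2⟩ | ⟨rfl, rfl⟩) <;> exact ⟨rfl, by omega, by omega⟩
        · rintro ⟨rfl, h1, h2⟩
          by_cases hb : b = k
          · exact Or.inr ⟨rfl, hb⟩
          · exact Or.inl ⟨rfl, by omega, h2⟩
      have hfuel : xs.countP (fun p => p.1 == x && decide (p.2 ≤ k - 1)) +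
          xs.countP (fun p => p.1 == x && decide (y + 1 ≤ p.2)) + 2 ≤ f := by
        have hlt := pvCountP_lt (fun p => p.1 == x && decide (p.2 ≤ k - 1))
          (fun p => p.1 == x && decide (p.2 ≤ k)) xs
          (by intro a hpa; simp only [Bool.and_eq_true, beq_iff_eq, decide_eq_true_eq] at hpa ⊢
              exact ⟨hpa.1, by omega⟩)
          (x, k) hm
          (by simp only [Bool.and_eq_false_iff, decide_eq_false_iff_not]; right; omega)
          (by simp)
        omega
      simp only [pvAuxA, hpop]
      rw [if_pos hm, pvAdd_of_not_mem found (x, k) hnot]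
      rw [pvPush_neg _ _ _ (Or.inl hc1)]
      rw [pvPush_pos _ _ _ hc2a hc2b, List.singleton_append]
      rw [ih (k - 1) (found ++ [(x, k)]) (by omega) hinv' hfuel]
      have hstep : pvScanDown xs x k found = pvScanDown xs x (k - 1) (found ++ [(x, k)]) := by
        rw [pvScanDown, dif_pos hm, pvAdd_of_not_mem found (x, k) hnot]
      rw [hstep]
    · have hinv' : ∀ a b, (a, b) ∈ found ↔ a = x ∧ k + 1 ≤ b ∧ b ≤ y + 1 - 1 := by
        intro a b
        rw [hinv a b]
        constructor <;> (rintro ⟨rfl, h1, h2⟩; exact ⟨rfl, by omega, by omega⟩)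
      simp only [pvAuxA, hpop]
      rw [if_neg hm]
      rw [pvUp xs x f (y + 1) (k + 1) found (by omega) hinv' (by omega)]
      rw [pvScanDown, dif_neg hm]

-- ===== VERDICT (by name: the statement is the Claim_ definition above) =====
theorem count_xs_py_spec : Claim_equal_count_xs_py := by
  intro x y xs _
  unfold Spec_count_xs_py count_xs_py count_xs_py_alt
  have hpop : PySem.List.pop? [(x, y)] = some ((x, y), []) := PySem.List.pop?_last [] (x, y)
  have hF : xs.length + 3 = (xs.length + 2) + 1 := rfl
  rw [hF]
  have hfuel0 : xs.countP (fun p => p.1 == x && decide (p.2 ≤ y - 1)) +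
      xs.countP (fun p => p.1 == x && decide (y + 1 ≤ p.2)) + 2 ≤ xs.length + 2 := by
    have := pvCountP_disj (fun p => p.1 == x && decide (p.2 ≤ y - 1))
      (fun p => p.1 == x && decide (y + 1 ≤ p.2)) xs
      (by intro a hpa
          simp only [Bool.and_eq_true, beq_iff_eq, decide_eq_true_eq] at hpa
          simp only [Bool.and_eq_false_iff, decide_eq_false_iff_not]
          right; omega)
    omega
  generalize hG : xs.length + 2 = F at hfuel0 ⊢
  by_cases h : (x, y) ∈ xs
  · have hadd : PySem.Set.add (PySem.Set.empty : List (Int × Int)) (x, y) = [(x, y)] := by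
      simp [PySem.Set.add, PySem.Set.contains, PySem.Set.empty]
    have hinv : ∀ a b, (a, b) ∈ ([(x, y)] : List (Int × Int)) ↔ a = x ∧ y - 1 + 1 ≤ b ∧ b ≤ y := by
      intro a b
      simp only [List.mem_singleton, Prod.mk.injEq]
      constructor
      · rintro ⟨rfl, rfl⟩; exact ⟨rfl, by omega, by omega⟩
      · rintro ⟨rfl, h1, h2⟩; exact ⟨rfl, by omega⟩
    have hc1 : (x, y + 1) ∉ ([(x, y)] : List (Int × Int)) := by
      simp only [List.mem_singleton, Prod.mk.injEq, not_and]
      intro _; omega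
    have hc2a : (x, y - 1) ∉ ([(x, y)] : List (Int × Int)) := by
      simp only [List.mem_singleton, Prod.mk.injEq, not_and]
      intro _; omega
    have hc2b : (x, y - 1) ∉ ([(x, y + 1)] : List (Int × Int)) := by
      simp only [List.mem_singleton, Prod.mk.injEq, not_and]
      intro _; omega
    simp only [pvAuxA, hpop]
    rw [if_pos h, hadd]
    rw [pvPush_pos _ _ _ hc1 (by simp), List.nil_append]
    rw [pvPush_pos _ _ _ hc2a hc2b, List.singleton_append]
    rw [pvDown xs x y F (y - 1) [(x, y)] (by omega) hinv hfuel0]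
    rw [if_pos h]
  · simp only [pvAuxA, hpop]
    rw [if_neg h, pvAuxA_nil]
    rw [if_neg h]
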